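-- pv_equiv track=rewrite | github.com/astroboi-SH-KWON/get_guide_fr_R1_barcode_fr_R2_then_check_Guide_Barcode_pairs | Logic.py | check_PAM_idx_by_guide_brcd
-- ===== SOURCE A (Python) =====
-- def check_PAM_idx_by_guide_brcd(guide_seq, brcd_seq, idx_g_b_list):
--     g_PAM_arr = []
--     b_PAM_idx = -1
--     for idx_g_b in range(len(idx_g_b_list)):
--         g_seq = idx_g_b_list[idx_g_b][1]
--         b_seq = idx_g_b_list[idx_g_b][2]
--         if g_seq == guide_seq:
--             g_PAM_arr.append(idx_g_b)
--         if b_seq == brcd_seq: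
--             b_PAM_idx = idx_g_b  # barcode is unique
--
--     return g_PAM_arr, b_PAM_idx
-- ===== SOURCE B (Python) =====
-- def check_PAM_idx_by_guide_brcd(guide_seq, brcd_seq, idx_g_b_list):
--     g_PAM_arr = [i for i, row in enumerate(idx_g_b_list) if row[1] == guide_seq]
--     b_PAM_idx = -1
--     for i in range(len(idx_g_b_list) - 1, -1, -1):
--         if idx_g_b_list[i][2] == brcd_seq:
--             b_PAM_idx = i
--             break
--     return g_PAM_arr, b_PAM_idx
-- ===== Notes on version B (the rewrite author's own statement) =====
-- stated objective: alternative
-- what changed: Fused single forward loop replaced by two separate passes: a comprehension over enumerate for guide indices, and a reverse scan with early break that stops at the first (i.e. last) barcode match instead of overwriting through the whole list.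
import Mathlib
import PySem

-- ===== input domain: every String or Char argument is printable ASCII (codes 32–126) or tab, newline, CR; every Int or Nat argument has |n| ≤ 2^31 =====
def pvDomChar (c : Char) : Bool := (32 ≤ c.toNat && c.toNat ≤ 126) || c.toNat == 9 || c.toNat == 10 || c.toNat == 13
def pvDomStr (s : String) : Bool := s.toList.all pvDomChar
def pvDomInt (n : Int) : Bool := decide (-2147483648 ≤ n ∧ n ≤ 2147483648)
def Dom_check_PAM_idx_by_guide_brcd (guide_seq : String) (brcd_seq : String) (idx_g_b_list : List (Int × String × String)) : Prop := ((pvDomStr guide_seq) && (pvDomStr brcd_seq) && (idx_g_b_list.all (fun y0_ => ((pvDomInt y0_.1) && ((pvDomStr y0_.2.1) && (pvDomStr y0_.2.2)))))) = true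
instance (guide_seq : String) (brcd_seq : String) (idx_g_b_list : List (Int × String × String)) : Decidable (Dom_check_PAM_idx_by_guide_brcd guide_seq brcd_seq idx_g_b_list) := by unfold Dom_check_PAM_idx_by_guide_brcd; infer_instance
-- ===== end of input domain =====

-- B splits A's fused forward loop into two passes: a filter/map over enumerate for the guide
-- indices and a reverse scan with early exit for the last barcode match (objective: alternative).

-- ===== PORT A =====
def check_PAM_idx_by_guide_brcd (guide_seq : String) (brcd_seq : String) (idx_g_b_list : List (Int × String × String)) : List Int × Int :=
  (PySem.List.pyRange 0 (idx_g_b_list.length : Int) 1).foldl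
    (fun (st : List Int × Int) (idx_g_b : Int) =>
      let g_seq := (PySem.List.pyGetD idx_g_b_list idx_g_b (0, "", "")).2.1
      let b_seq := (PySem.List.pyGetD idx_g_b_list idx_g_b (0, "", "")).2.2
      let st1 := if g_seq = guide_seq then (st.1 ++ [idx_g_b], st.2) else st
      if b_seq = brcd_seq then (st1.1, idx_g_b) else st1)
    ([], -1)

-- ===== PORT B =====
-- reverse scan: first barcode match going down from index n-1; -1 if none (Source B's second loop)
def pvBScan (brcd_seq : String) (idx_g_b_list : List (Int × String × String)) : Nat → Int
  | 0 => -1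
  | n + 1 =>
    if (PySem.List.pyGetD idx_g_b_list (n : Int) (0, "", "")).2.2 = brcd_seq then (n : Int)
    else pvBScan brcd_seq idx_g_b_list n

def check_PAM_idx_by_guide_brcd_alt (guide_seq : String) (brcd_seq : String) (idx_g_b_list : List (Int × String × String)) : List Int × Int :=
  (((PySem.List.enumerate idx_g_b_list 0).filter (fun p => p.2.2.1 = guide_seq)).map (·.1),
   pvBScan brcd_seq idx_g_b_list idx_g_b_list.length)

-- ===== PRECONDITION & SPEC =====
def Spec_check_PAM_idx_by_guide_brcd (guide_seq : String) (brcd_seq : String) (idx_g_b_list : List (Int × String × String)) (out : List Int × Int) : Prop := out = check_PAM_idx_by_guide_brcd_alt guide_seq brcd_seq idx_g_b_list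
instance (guide_seq : String) (brcd_seq : String) (idx_g_b_list : List (Int × String × String)) (out : List Int × Int) : Decidable (Spec_check_PAM_idx_by_guide_brcd guide_seq brcd_seq idx_g_b_list out) := by unfold Spec_check_PAM_idx_by_guide_brcd; infer_instance

-- ===== CLAIM (what is proved, stated in full; the proofs are below) =====
def Claim_equal_check_PAM_idx_by_guide_brcd : Prop := ∀ (guide_seq : String) (brcd_seq : String) (idx_g_b_list : List (Int × String × String)), Dom_check_PAM_idx_by_guide_brcd guide_seq brcd_seq idx_g_b_list → Spec_check_PAM_idx_by_guide_brcd guide_seq brcd_seq idx_g_b_list (check_PAM_idx_by_guide_brcd guide_seq brcd_seq idx_g_b_list)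

-- ===== LEMMAS AND PROOFS =====

-- A's loop body, as a function of the (index, row) pair
def pvStep (guide_seq brcd_seq : String) (st : List Int × Int) (p : Int × Int × String × String) : List Int × Int :=
  let st1 := if p.2.2.1 = guide_seq then (st.1 ++ [p.1], st.2) else st
  if p.2.2.2 = brcd_seq then (st1.1, p.1) else st1

theorem pvA_eq_foldl_enumerate (guide_seq brcd_seq : String) (l : List (Int × String × String)) :
    check_PAM_idx_by_guide_brcd guide_seq brcd_seq l
      = (PySem.List.enumerate l 0).foldl (pvStep guide_seq brcd_seq) ([], -1) := by
  rw [PySem.List.enumerate_eq_map_pyRange (d := (0, "", "")), List.foldl_map]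
  simp [check_PAM_idx_by_guide_brcd, pvStep, PySem.List.len]

theorem pvFst_foldl (guide_seq brcd_seq : String) (es : List (Int × Int × String × String))
    (acc : List Int) (c : Int) :
    ((es.foldl (pvStep guide_seq brcd_seq) (acc, c)).1)
      = acc ++ (es.filter (fun p => p.2.2.1 = guide_seq)).map (·.1) := by
  induction es generalizing acc c with
  | nil => simp
  | cons p es ih =>
    simp only [List.foldl_cons, pvStep]
    by_cases hg : p.2.2.1 = guide_seq <;> by_cases hb : p.2.2.2 = brcd_seq <;>
      simp [hg, hb, ih]

theorem pvSnd_foldl (guide_seq brcd_seq : String) (es : List (Int × Int × String × String))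
    (acc : List Int) (c : Int) :
    ((es.foldl (pvStep guide_seq brcd_seq) (acc, c)).2)
      = es.foldl (fun cur p => if p.2.2.2 = brcd_seq then p.1 else cur) c := by
  induction es generalizing acc c with
  | nil => simp
  | cons p es ih =>
    simp only [List.foldl_cons, pvStep]
    split_ifs with h1 h2 <;> simp [ih]

theorem pvBScan_append (brcd_seq : String) (l : List (Int × String × String))
    (x : Int × String × String) (n : Nat) (hn : n ≤ l.length) :
    pvBScan brcd_seq (l ++ [x]) n = pvBScan brcd_seq l n := by
  induction n with
  | zero => rfl
  | succ k ih =>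
    have hk : k < l.length := by omega
    simp only [pvBScan, PySem.List.pyGetD_natCast, List.getD,
      List.getElem?_append_left hk, ih (by omega)]

theorem pvSnd_eq_bscan (brcd_seq : String) (l : List (Int × String × String)) :
    (PySem.List.enumerate l 0).foldl
        (fun cur (p : Int × Int × String × String) => if p.2.2.2 = brcd_seq then p.1 else cur) (-1)
      = pvBScan brcd_seq l l.length := by
  induction l using List.reverseRecOn with
  | nil => rfl
  | append_singleton l x ih =>
    rw [PySem.List.enumerate_append, List.foldl_append]
    have hlen : (l ++ [x]).length = l.length + 1 := by simp
    rw [hlen]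
    simp only [pvBScan, PySem.List.pyGetD_natCast, List.getD, List.getElem?_append_right (le_refl l.length),
      Nat.sub_self, List.getElem?_cons_zero, Option.getD_some,
      pvBScan_append brcd_seq l x l.length (le_refl _), ih]
    simp [PySem.List.enumerate]

-- ===== VERDICT (by name: the statement is the Claim_ definition above) =====
theorem check_PAM_idx_by_guide_brcd_spec : Claim_equal_check_PAM_idx_by_guide_brcd := by
  intro guide_seq brcd_seq l _
  unfold Spec_check_PAM_idx_by_guide_brcd check_PAM_idx_by_guide_brcd_alt
  rw [pvA_eq_foldl_enumerate]
  refine Prod.ext ?_ ?_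
  · simpa using pvFst_foldl guide_seq brcd_seq (PySem.List.enumerate l 0) [] (-1)
  · rw [pvSnd_foldl, pvSnd_eq_bscan]
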